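-- pv_equiv track=rewrite | github.com/nishantsharma/xml.ai | src/DeepInXML/hier2hier/models/hier2hierBatch.py | tuple2PackedIndex
-- ===== SOURCE A (Python) =====
-- def tuple2PackedIndex(decreasingObjLengths):
--     # Build tuple2PackedIndex.
--     packedIndex = 0
--     objCount = len(decreasingObjLengths)
--     if not objCount:
--         return []
--     maxObjLength = decreasingObjLengths[0]
--
--     tuple2PackedIndex = {}
--     for indexWithinObj in range(maxObjLength):
--         for objIndex in range(objCount):
--             if indexWithinObj >= decreasingObjLengths[objIndex]:
--                 # This tree doesn't have any more nodes.
--                 break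
--             tuple2PackedIndex[(objIndex, indexWithinObj)] = packedIndex
--             packedIndex += 1
--
--     return tuple2PackedIndex
-- ===== SOURCE B (Python) =====
-- def tuple2PackedIndex(decreasingObjLengths):
--     # Decomposition: running-minimum "alive profile" + per-level alive counts with
--     # arithmetic packed indices (offset + objIndex) instead of A's running
--     # counter with the break inside the filling loop.
--     if not decreasingObjLengths:
--         return []
--     m = decreasingObjLengths[0]
--     mins = []
--     for L in decreasingObjLengths:
--         m = min(m, L)
--         mins.append(m)
--     result = {}
--     offset = 0
--     for level in range(decreasingObjLengths[0]):
--         # mins is non-increasing, so the objects alive at this level are a prefix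
--         alive = 0
--         for x in mins:
--             if x <= level:
--                 break
--             alive += 1
--         for obj in range(alive):
--             result[(obj, level)] = offset + obj
--         offset += alive
--     return result
-- ===== Notes on version B (the rewrite author's own statement) =====
-- stated objective: alternative
-- what changed: Replaces A's single running packed-index counter and break-on-too-short filling loop with a precomputed running-minimum alive profile: per level it counts the surviving prefix of that profile and fills entries arithmetically as offset + objIndex.
import Mathlib
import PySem

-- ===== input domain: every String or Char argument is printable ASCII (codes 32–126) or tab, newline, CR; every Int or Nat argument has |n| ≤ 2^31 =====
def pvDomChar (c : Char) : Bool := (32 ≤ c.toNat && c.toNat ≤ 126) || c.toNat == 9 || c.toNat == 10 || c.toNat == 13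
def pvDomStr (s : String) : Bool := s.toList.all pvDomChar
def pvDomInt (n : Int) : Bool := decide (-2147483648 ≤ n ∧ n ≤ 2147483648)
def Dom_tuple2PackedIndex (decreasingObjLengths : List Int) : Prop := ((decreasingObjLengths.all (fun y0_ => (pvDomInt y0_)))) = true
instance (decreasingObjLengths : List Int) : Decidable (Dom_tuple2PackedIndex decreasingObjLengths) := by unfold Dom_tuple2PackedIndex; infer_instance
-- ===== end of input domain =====

-- B replaces A's running counter + inner break with a running-minimum alive-count
-- profile and arithmetic packed indices (offset + objIndex): a different
-- decomposition of the same numbering (objective: alternative, not faster).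
-- The dict's keys (objIndex, level) are pairwise distinct, so each dict insertion
-- appends a fresh entry; both ports build the assoc list by appending.

-- ===== PORT A =====
-- inner loop of A: 'for objIndex in range(objCount): if indexWithinObj >= L[objIndex]: break; …'
-- ported as structural recursion over the enumerated list; returning the state early is the 'break'.
def pvInnerA (level : Int) :
    List (Int × Int × Int) × Int → List (Int × Int) → List (Int × Int × Int) × Int
  | st, [] => st
  | (acc, pk), (obj, len) :: rest =>
      if len ≤ level then (acc, pk)
      else pvInnerA level (acc ++ [(obj, level, pk)], pk + 1) rest

def tuple2PackedIndex (decreasingObjLengths : List Int) : List (Int × Int × Int) :=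
  if decreasingObjLengths.length = 0 then []
  else
    let maxObjLength := PySem.List.pyGetD decreasingObjLengths 0 0
    ((PySem.List.pyRange 0 maxObjLength 1).foldl
      (fun st level => pvInnerA level st (PySem.List.enumerate decreasingObjLengths))
      ([], 0)).1

-- ===== PORT B =====
-- B's alive-count loop ('for x in mins: if x <= level: break; alive += 1'),
-- ported as structural recursion; returning the accumulator early is the 'break'.
def pvCountB (level : Int) : Int → List Int → Int
  | c, [] => c
  | c, x :: rest => if x ≤ level then c else pvCountB level (c + 1) rest

def tuple2PackedIndex_alt (decreasingObjLengths : List Int) : List (Int × Int × Int) :=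
  if decreasingObjLengths.length = 0 then []
  else
    let mins := (decreasingObjLengths.foldl
        (fun (st : Int × List Int) L => (min st.1 L, st.2 ++ [min st.1 L]))
        (PySem.List.pyGetD decreasingObjLengths 0 0, [])).2
    ((PySem.List.pyRange 0 (PySem.List.pyGetD decreasingObjLengths 0 0) 1).foldl
      (fun (st : List (Int × Int × Int) × Int) level =>
        let alive := pvCountB level 0 mins
        ((PySem.List.pyRange 0 alive 1).foldl
            (fun acc obj => acc ++ [(obj, level, st.2 + obj)]) st.1,
         st.2 + alive))
      ([], 0)).1

-- ===== PRECONDITION & SPEC =====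
def Spec_tuple2PackedIndex (decreasingObjLengths : List Int) (out : List (Int × Int × Int)) : Prop := out = tuple2PackedIndex_alt decreasingObjLengths
instance (decreasingObjLengths : List Int) (out : List (Int × Int × Int)) : Decidable (Spec_tuple2PackedIndex decreasingObjLengths out) := by unfold Spec_tuple2PackedIndex; infer_instance

-- ===== CLAIM (what is proved, stated in full; the proofs are below) =====
def Claim_equal_tuple2PackedIndex : Prop := ∀ (decreasingObjLengths : List Int), Dom_tuple2PackedIndex decreasingObjLengths → Spec_tuple2PackedIndex decreasingObjLengths (tuple2PackedIndex decreasingObjLengths)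

-- ===== LEMMAS AND PROOFS =====

-- spec-side running minimum
def pvMinsRec (m : Int) : List Int → List Int
  | [] => []
  | a :: t => min m a :: pvMinsRec (min m a) t

lemma pvMinsFold (l : List Int) : ∀ (m : Int) (acc : List Int),
    (l.foldl (fun (st : Int × List Int) L => (min st.1 L, st.2 ++ [min st.1 L])) (m, acc)).2
      = acc ++ pvMinsRec m l := by
  induction l with
  | nil => intro m acc; simp [pvMinsRec]
  | cons a t ih => intro m acc; simp [pvMinsRec, ih (min m a) (acc ++ [min m a])]

lemma pvCountB_eq (level : Int) (l : List Int) : ∀ (c : Int),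
    pvCountB level c l = c + ((l.takeWhile (fun x => decide (level < x))).length : Int) := by
  induction l with
  | nil => intro c; simp [pvCountB]
  | cons a t ih =>
    intro c
    by_cases h : a ≤ level
    · have h2 : ¬ level < a := by omega
      simp [pvCountB, h, h2]
    · have h2 : level < a := by omega
      simp only [pvCountB, if_neg h, ih (c + 1)]
      have hTW : (a :: t).takeWhile (fun x => decide (level < x))
          = a :: t.takeWhile (fun x => decide (level < x)) := by simp [h2]
      rw [hTW, List.length_cons]
      push_cast; ring

lemma pvCountMins (l : List Int) : ∀ (m level : Int),
    ((pvMinsRec m l).takeWhile (fun x => decide (level < x))).length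
      = if level < m then (l.takeWhile (fun x => decide (level < x))).length else 0 := by
  induction l with
  | nil => intro m level; simp [pvMinsRec]
  | cons a t ih =>
    intro m level
    simp only [pvMinsRec, List.takeWhile_cons]
    by_cases h1 : level < m <;> by_cases h2 : level < a
    · have hm : level < min m a := lt_min h1 h2
      simp [hm, h1, h2, ih (min m a) level]
    · have hm : ¬ level < min m a := by omega
      simp [hm, h1, h2]
    · have hm : ¬ level < min m a := by omega
      simp [hm, h1]
    · have hm : ¬ level < min m a := by omega
      simp [hm, h1]

lemma pvShiftMap (j pk level : Int) (n : Nat) :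
    List.map (fun i : Nat => (j + (i : Int), level, pk + (i : Int))) (List.range (n + 1))
      = (j, level, pk) ::
        List.map (fun i : Nat => (j + 1 + (i : Int), level, pk + 1 + (i : Int))) (List.range n) := by
  rw [List.range_succ_eq_map, List.map_cons, List.map_map]
  simp only [Nat.cast_zero, add_zero]
  refine congrArg _ ?_
  refine List.map_congr_left ?_
  intro i _
  simp only [Function.comp_apply, Prod.mk.injEq]
  push_cast
  exact ⟨by ring, trivial, by ring⟩

lemma pvInnerA_eq (l : List Int) : ∀ (j level : Int) (acc : List (Int × Int × Int)) (pk : Int),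
    pvInnerA level (acc, pk) (PySem.List.enumerate l j)
      = (acc ++ (List.range (l.takeWhile (fun x => decide (level < x))).length).map
            (fun i : Nat => (j + (i : Int), level, pk + (i : Int))),
         pk + ((l.takeWhile (fun x => decide (level < x))).length : Int)) := by
  induction l with
  | nil => intro j level acc pk; simp [PySem.List.enumerate, pvInnerA]
  | cons a t ih =>
    intro j level acc pk
    rw [PySem.List.enumerate_cons]
    by_cases h : a ≤ level
    · have h2 : ¬ level < a := by omega
      simp [pvInnerA, h, h2]
    · have h2 : level < a := by omega
      simp only [pvInnerA, if_neg h]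
      rw [ih (j + 1) level (acc ++ [(j, level, pk)]) (pk + 1)]
      have hTW : (a :: t).takeWhile (fun x => decide (level < x))
          = a :: t.takeWhile (fun x => decide (level < x)) := by simp [h2]
      simp only [hTW, List.length_cons]
      refine Prod.ext ?_ ?_
      · rw [pvShiftMap j pk level]
        simp [List.append_assoc]
      · push_cast; ring

-- per-level step: A's inner break loop = B's counted arithmetic fill, for every state
lemma pvStep_eq (h : Int) (t : List Int) (st : List (Int × Int × Int) × Int) (level : Int) :
    pvInnerA level st (PySem.List.enumerate (h :: t))
      = ((PySem.List.pyRange 0 (pvCountB level 0 (pvMinsRec h (h :: t))) 1).foldl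
            (fun acc obj => acc ++ [(obj, level, st.2 + obj)]) st.1,
         st.2 + pvCountB level 0 (pvMinsRec h (h :: t))) := by
  have hc : pvCountB level 0 (pvMinsRec h (h :: t))
      = (((h :: t).takeWhile (fun x => decide (level < x))).length : Int) := by
    rw [pvCountB_eq, zero_add]
    rw [Int.natCast_inj.mpr (pvCountMins (h :: t) h level)]
    by_cases hl : level < h
    · simp [hl]
    · simp [hl]
  rw [hc]
  obtain ⟨acc, pk⟩ := st
  rw [pvInnerA_eq (h :: t) 0 level acc pk]
  rw [PySem.List.foldl_append_singleton_eq_map]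
  rw [PySem.List.pyRange_zero_nat]
  refine Prod.ext ?_ rfl
  rw [List.map_map]
  refine congrArg (acc ++ ·) ?_
  refine List.map_congr_left ?_
  intro i _
  simp only [Function.comp_apply, zero_add]

-- ===== VERDICT (by name: the statement is the Claim_ definition above) =====
theorem tuple2PackedIndex_spec : Claim_equal_tuple2PackedIndex := by
  intro ls _hdom
  unfold Spec_tuple2PackedIndex
  cases ls with
  | nil => rfl
  | cons h t =>
    simp only [tuple2PackedIndex, tuple2PackedIndex_alt, List.length_cons]
    have hget : PySem.List.pyGetD (h :: t) 0 0 = h := by simp [pysem]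
    rw [hget]
    have hmins : ((h :: t).foldl
        (fun (st : Int × List Int) L => (min st.1 L, st.2 ++ [min st.1 L])) (h, [])).2
        = pvMinsRec h (h :: t) := by
      simpa using pvMinsFold (h :: t) h []
    simp only [if_neg (by omega : ¬ (t.length + 1 = 0)), hmins]
    refine congrArg Prod.fst ?_
    refine PySem.List.foldl_congr_mem _ _ _ _ ?_
    intro st level _
    exact pvStep_eq h t st level
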